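-- pv_equiv track=rewrite | github.com/manu-leach/wordle_solver | sort_lexicon.py | sort_repeats_to_bottom
-- ===== SOURCE A (Python) =====
-- def sort_repeats_to_bottom(word_list):
--
--     go_to_bottom = []
--
--     for word in word_list:
--         for letter in word:
--             if word.count(letter) > 1:
--                 go_to_bottom.append(word)
--                 break
--
--     for word in go_to_bottom:
--         word_list.remove(word)
--         word_list.append(word)
--
--     return word_list
-- ===== SOURCE B (Python) =====
-- def sort_repeats_to_bottom(word_list):
--     # Stable partition: words whose letters are all distinct first, the rest after,
--     # each group in original order.  The list object is mutated in place, as A does.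
--     word_list[:] = ([w for w in word_list if len(set(w)) == len(w)]
--                     + [w for w in word_list if len(set(w)) != len(w)])
--     return word_list
-- ===== Notes on version B (the rewrite author's own statement) =====
-- stated objective: faster
-- what changed: Replaces the count-per-letter scan plus repeated list.remove/append mutation with a single set-based repeat test per word and a stable two-filter partition.
import Mathlib
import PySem

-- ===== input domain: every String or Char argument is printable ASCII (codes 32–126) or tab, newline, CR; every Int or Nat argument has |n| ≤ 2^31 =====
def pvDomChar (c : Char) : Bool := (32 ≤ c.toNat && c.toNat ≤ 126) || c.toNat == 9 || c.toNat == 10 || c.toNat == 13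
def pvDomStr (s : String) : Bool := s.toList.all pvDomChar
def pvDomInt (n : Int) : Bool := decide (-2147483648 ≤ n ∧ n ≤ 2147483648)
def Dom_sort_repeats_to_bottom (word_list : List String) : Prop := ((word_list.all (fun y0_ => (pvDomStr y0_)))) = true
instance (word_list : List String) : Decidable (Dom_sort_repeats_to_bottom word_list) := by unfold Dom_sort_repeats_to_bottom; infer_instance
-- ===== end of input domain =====

-- B replaces A's per-letter count scan and repeated list.remove/append mutation loop by a
-- set-based repeat test and a stable two-filter partition; return-value equivalence (both
-- Pythons mutate the argument list in place, ending with the same contents).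

-- ===== PORT A =====
-- A-side helper: the inner loop 'for letter in word: if word.count(letter) > 1: …; break'
def pvRepeatScan (w : List Char) : List Char → Bool
  | [] => false
  | c :: rest => if 1 < PySem.Chars.count w [c] then true else pvRepeatScan w rest

def sort_repeats_to_bottom (word_list : List String) : List String :=
  let go_to_bottom := word_list.foldl
    (fun acc word => if pvRepeatScan word.toList word.toList then acc ++ [word] else acc) []
  go_to_bottom.foldl
    (fun wl word =>
      match PySem.List.remove? wl word with
      | some wl' => wl' ++ [word]
      -- none = ValueError; unreachable: every word of go_to_bottom still occurs in wl
      | none => wl) word_list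

-- ===== PORT B =====
-- B-side helper: 'len(set(w)) == len(w)'
def pvDistinctLen (w : String) : Bool := (PySem.Set.ofList w.toList).length == w.toList.length

def sort_repeats_to_bottom_alt (word_list : List String) : List String :=
  word_list.filter (fun w => pvDistinctLen w) ++ word_list.filter (fun w => !pvDistinctLen w)

-- ===== PRECONDITION & SPEC =====
def Spec_sort_repeats_to_bottom (word_list : List String) (out : List String) : Prop := out = sort_repeats_to_bottom_alt word_list
instance (word_list : List String) (out : List String) : Decidable (Spec_sort_repeats_to_bottom word_list out) := by unfold Spec_sort_repeats_to_bottom; infer_instance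

-- ===== CLAIM (what is proved, stated in full; the proofs are below) =====
def Claim_equal_sort_repeats_to_bottom : Prop := ∀ (word_list : List String), Dom_sort_repeats_to_bottom word_list → Spec_sort_repeats_to_bottom word_list (sort_repeats_to_bottom word_list)

-- ===== LEMMAS AND PROOFS =====

-- 'word.count(letter)' with a one-character needle is the character count
theorem pvCountGo_single (c : Char) : ∀ (l : List Char) (fuel acc : Nat), l.length ≤ fuel →
    PySem.Chars.count.go [c] fuel l acc = acc + l.count c := by
  intro l
  induction l with
  | nil => intro fuel acc _; cases fuel <;> simp [PySem.Chars.count.go]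
  | cons h t ih =>
    intro fuel acc hf
    cases fuel with
    | zero => simp at hf
    | succ f =>
      by_cases hc : c = h
      · subst hc
        simp only [PySem.Chars.count.go, List.isPrefixOf, BEq.rfl, Bool.true_and, if_true]
        rw [show List.drop [c].length (c :: t) = t from by simp]
        rw [ih f (acc + 1) (by simpa using Nat.le_of_succ_le_succ hf)]
        rw [List.count_cons_self]; omega
      · have hb : (c == h) = false := by simp [hc]
        simp only [PySem.Chars.count.go, List.isPrefixOf, hb, Bool.false_and,
          if_neg Bool.false_ne_true]
        rw [ih f acc (by simpa using Nat.le_of_succ_le_succ hf)]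
        rw [List.count_cons_of_ne (Ne.symm hc)]

theorem pvCount_single (cs : List Char) (c : Char) : PySem.Chars.count cs [c] = cs.count c := by
  simpa using pvCountGo_single c cs cs.length 0 le_rfl

theorem pvRepeatScan_eq (w : List Char) : ∀ rest,
    pvRepeatScan w rest = rest.any (fun c => decide (1 < w.count c)) := by
  intro rest
  induction rest with
  | nil => rfl
  | cons c t ih =>
    simp only [pvRepeatScan, pvCount_single, List.any_cons, ← ih]
    by_cases h : 1 < w.count c <;> simp [h]

theorem pvScan_iff (cs : List Char) : pvRepeatScan cs cs = true ↔ ¬ cs.Nodup := by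
  rw [pvRepeatScan_eq, List.any_eq_true, List.nodup_iff_count_le_one]
  push Not
  constructor
  · rintro ⟨c, _, hc⟩; exact ⟨c, by simpa using hc⟩
  · rintro ⟨c, hc⟩
    refine ⟨c, ?_, by simpa using hc⟩
    exact List.count_pos_iff.mp (by omega)

theorem pvDistinct_iff (w : String) : pvDistinctLen w = true ↔ w.toList.Nodup := by
  unfold pvDistinctLen
  rw [beq_iff_eq]
  constructor
  · intro h
    have h1 : (PySem.Set.ofList w.toList).toFinset = w.toList.toFinset := by
      ext x; simp [List.mem_toFinset, PySem.Set.mem_ofList]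
    have h2 := List.toFinset_card_of_nodup (PySem.Set.nodup_ofList w.toList)
    rw [h1] at h2
    have h3 : w.toList.toFinset.card = w.toList.length := by omega
    rw [List.card_toFinset] at h3
    have h4 := (List.dedup_sublist w.toList).eq_of_length h3
    rw [← h4]; exact List.nodup_dedup w.toList
  · intro h; rw [PySem.Set.ofList_eq_self_of_nodup w.toList h]

theorem pvPred_eq (w : String) : pvRepeatScan w.toList w.toList = !pvDistinctLen w := by
  by_cases h : w.toList.Nodup
  · have h1 : pvRepeatScan w.toList w.toList = false := by
      cases hb : pvRepeatScan w.toList w.toList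
      · rfl
      · exact absurd h ((pvScan_iff w.toList).mp hb)
    have h2 : pvDistinctLen w = true := (pvDistinct_iff w).mpr h
    simp [h1, h2]
  · have h1 : pvRepeatScan w.toList w.toList = true := by
      cases hb : pvRepeatScan w.toList w.toList
      · exact absurd ((pvScan_iff w.toList).not_left.mp (by simp [hb])) (by simpa using h)
      · rfl
    have h2 : pvDistinctLen w = false := by
      cases hb : pvDistinctLen w
      · rfl
      · exact absurd ((pvDistinct_iff w).mp hb) h
    simp [h1, h2]

-- sequential first-occurrence erasure: the net effect of A's 'word_list.remove(word)' calls
def pvEraseEach (acc : List String) : List String → List String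
  | [] => acc
  | w :: t => pvEraseEach (acc.erase w) t

theorem pvEraseEach_append (t : List String) : ∀ (a b : List String),
    (∀ v, t.count v ≤ a.count v) → pvEraseEach (a ++ b) t = pvEraseEach a t ++ b := by
  induction t with
  | nil => intro a b _; rfl
  | cons u t' ih =>
    intro a b h
    have hu0 := h u
    rw [List.count_cons_self] at hu0
    have hu : u ∈ a := List.count_pos_iff.mp (by omega)
    simp only [pvEraseEach]
    rw [List.erase_append_left b hu]
    refine ih (a.erase u) b ?_
    intro v
    by_cases hvu : v = u
    · subst hvu
      rw [List.count_erase_self]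
      omega
    · rw [List.count_erase_of_ne hvu]
      have hv := h v
      rw [List.count_cons_of_ne (Ne.symm hvu)] at hv
      omega

theorem pvFold_eq_eraseEach : ∀ (gb acc : List String), (∀ v, gb.count v ≤ acc.count v) →
    gb.foldl (fun wl word =>
      match PySem.List.remove? wl word with
      | some wl' => wl' ++ [word]
      | none => wl) acc = pvEraseEach acc gb ++ gb := by
  intro gb
  induction gb with
  | nil => intro acc _; simp [pvEraseEach]
  | cons w t ih =>
    intro acc h
    have hw0 := h w
    rw [List.count_cons_self] at hw0
    have hw : w ∈ acc := List.count_pos_iff.mp (by omega)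
    have hcount : ∀ v, t.count v ≤ (acc.erase w).count v := by
      intro v
      by_cases hvw : v = w
      · subst hvw; rw [List.count_erase_self]; omega
      · rw [List.count_erase_of_ne hvw]
        have hv := h v
        rw [List.count_cons_of_ne (Ne.symm hvw)] at hv
        omega
    have hrem := PySem.List.remove?_eq_some_erase acc w hw
    simp only [List.foldl_cons, hrem]
    rw [ih (acc.erase w ++ [w]) (fun v => by
      have := hcount v
      rw [List.count_append]
      omega)]
    rw [pvEraseEach_append t (acc.erase w) [w] hcount]
    simp only [pvEraseEach, List.append_assoc, List.singleton_append]

theorem pvEraseEach_skip (t : List String) : ∀ (c : String) (a : List String),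
    (∀ u ∈ t, u ≠ c) → pvEraseEach (c :: a) t = c :: pvEraseEach a t := by
  induction t with
  | nil => intro c a _; rfl
  | cons u t' ih =>
    intro c a h
    have huc : u ≠ c := h u (by simp)
    simp only [pvEraseEach]
    rw [List.erase_cons_tail (by simp; exact Ne.symm huc)]
    exact ih c (a.erase u) (fun v hv => h v (by simp [hv]))

theorem pvEraseEach_filter (p : String → Bool) : ∀ (cs : List String),
    pvEraseEach cs (cs.filter p) = cs.filter (fun x => !p x) := by
  intro cs
  induction cs with
  | nil => rfl
  | cons c cs ih =>
    by_cases h : p c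
    · rw [List.filter_cons_of_pos h]
      simp only [pvEraseEach, List.erase_cons_head]
      rw [ih]
      simp [h]
    · rw [List.filter_cons_of_neg (by simpa using h)]
      rw [pvEraseEach_skip (cs.filter p) c cs (fun u hu => by
        intro huc
        subst huc
        exact h (List.of_mem_filter hu))]
      rw [ih]
      simp [h]

-- ===== VERDICT (by name: the statement is the Claim_ definition above) =====
theorem sort_repeats_to_bottom_spec : Claim_equal_sort_repeats_to_bottom := by
  intro wl _
  unfold Spec_sort_repeats_to_bottom sort_repeats_to_bottom sort_repeats_to_bottom_alt
  simp only
  rw [PySem.List.foldl_append_if]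
  simp only [List.nil_append, List.map_id']
  rw [pvFold_eq_eraseEach _ wl (fun v => (List.filter_sublist).count_le v)]
  rw [pvEraseEach_filter]
  have h1 : wl.filter (fun x => !pvRepeatScan x.toList x.toList) = wl.filter (fun w => pvDistinctLen w) :=
    List.filter_congr (fun x _ => by rw [pvPred_eq]; simp)
  have h2 : wl.filter (fun x => pvRepeatScan x.toList x.toList) = wl.filter (fun w => !pvDistinctLen w) :=
    List.filter_congr (fun x _ => by rw [pvPred_eq])
  rw [h1, h2]
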